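-- pv_equiv track=rewrite | github.com/NGOCANH198/Python | OneDrive/Máy tính/python_code/Mức_1/bienDoiDaySo.py | Try
-- ===== SOURCE A (Python) =====
-- def Try(a,ans):
--     if(a[0] ==a[1]==a[2] ==a[3]): return ans
--     else:
--         x = a[0];y =a[1]
--         z = a[2];t=a[3]
--         a[0] = abs(x-y)
--         a[1] = abs(y-z)
--         a[2] = abs(z-t)
--         a[3] = abs(t-x)
--         return Try(a,ans+1)
-- ===== SOURCE B (Python) =====
-- def Try(a, ans):
--     # Iterative rewrite: work on four local values, write them back at the end
--     # (same final mutation of a[0..3] and same step count as the recursive original).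
--     w, x, y, z = a[0], a[1], a[2], a[3]
--     n = ans
--     while not (w == x == y == z):
--         w, x, y, z = abs(w - x), abs(x - y), abs(y - z), abs(z - w)
--         n += 1
--     a[0], a[1], a[2], a[3] = w, x, y, z
--     return n
-- ===== Notes on version B (the rewrite author's own statement) =====
-- stated objective: simpler
-- what changed: Replaced the recursive Ducci step (which rebuilds the list and recurses, risking RecursionError on deep sequences) by an iterative while-loop over four local scalars that writes the converged values back once; same step count and same final mutation of a.
import Mathlib
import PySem

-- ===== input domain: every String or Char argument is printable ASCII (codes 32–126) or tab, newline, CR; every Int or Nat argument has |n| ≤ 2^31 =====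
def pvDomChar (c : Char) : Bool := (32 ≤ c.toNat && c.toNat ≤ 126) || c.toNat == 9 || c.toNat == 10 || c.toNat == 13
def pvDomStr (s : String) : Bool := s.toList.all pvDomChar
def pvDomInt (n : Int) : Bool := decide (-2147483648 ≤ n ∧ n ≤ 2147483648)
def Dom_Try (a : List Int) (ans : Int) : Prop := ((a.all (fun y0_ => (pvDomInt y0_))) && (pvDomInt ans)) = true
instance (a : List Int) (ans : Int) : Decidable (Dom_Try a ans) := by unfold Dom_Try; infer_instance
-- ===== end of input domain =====

-- B replaces A's recursion on the mutated list by an iterative loop over four local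
-- scalars (simpler, no recursion); both mutate a[0..3] to the converged values — the
-- equivalence proved here is about the RETURN value, and B performs the same mutation.
-- Both ports carry a fuel counter only to make the same computation total; within the
-- proved claim both exhaust fuel to the same value, so it never changes the equality.

-- ===== PORT A =====
-- recursive Ducci step: rebuild the list with a[0..3] updated and recurse with ans+1
def TryGo : Nat → List Int → Int → Int
  | 0, _, ans => ans
  | Nat.succ f, a, ans =>
    if a.getD 0 0 = a.getD 1 0 ∧ a.getD 1 0 = a.getD 2 0 ∧ a.getD 2 0 = a.getD 3 0 then
      ans
    else
      let x := a.getD 0 0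
      let y := a.getD 1 0
      let z := a.getD 2 0
      let t := a.getD 3 0
      TryGo f ((((a.set 0 |x - y|).set 1 |y - z|).set 2 |z - t|).set 3 |t - x|) (ans + 1)

def Try (a : List Int) (ans : Int) : Int := TryGo 1000000 a ans

-- ===== PORT B =====
-- iterative loop over four local scalars w x y z with counter n
def TryLoop : Nat → Int → Int → Int → Int → Int → Int
  | 0, _, _, _, _, n => n
  | Nat.succ f, w, x, y, z, n =>
    if w = x ∧ x = y ∧ y = z then n
    else TryLoop f |w - x| |x - y| |y - z| |z - w| (n + 1)

def Try_alt (a : List Int) (ans : Int) : Int :=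
  TryLoop 1000000 (a.getD 0 0) (a.getD 1 0) (a.getD 2 0) (a.getD 3 0) ans

-- ===== PRECONDITION & SPEC =====
-- Pre_ excludes lists with fewer than 4 elements, on which A raises IndexError.
def Pre_Try (a : List Int) (ans : Int) : Prop := 4 ≤ a.length
instance (a : List Int) (ans : Int) : Decidable (Pre_Try a ans) := by unfold Pre_Try; infer_instance
def pvWitness_Try : List Int × Int := ([3, 1, 4, 1], 0)
def Spec_Try (a : List Int) (ans : Int) (out : Int) : Prop := out = Try_alt a ans
instance (a : List Int) (ans : Int) (out : Int) : Decidable (Spec_Try a ans out) := by unfold Spec_Try; infer_instance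

-- ===== CLAIM (what is proved, stated in full; the proofs are below) =====
def Claim_equal_Try : Prop := ∀ (a : List Int) (ans : Int), Dom_Try a ans → Pre_Try a ans → Spec_Try a ans (Try a ans)

-- ===== LEMMAS AND PROOFS =====
-- For any fuel, the recursion on the list and the loop on the four scalars agree.
theorem tryGo_eq_tryLoop : ∀ (f : Nat) (a : List Int) (ans : Int), 4 ≤ a.length →
    TryGo f a ans = TryLoop f (a.getD 0 0) (a.getD 1 0) (a.getD 2 0) (a.getD 3 0) ans := by
  intro f
  induction f with
  | zero => intro a ans _; rfl
  | succ f ih =>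
    intro a ans h
    match a with
    | p :: q :: r :: s :: rest =>
      by_cases hc : p = q ∧ q = r ∧ r = s
      · simp [TryGo, TryLoop, List.getD, hc]
      · have := ih (|p - q| :: |q - r| :: |r - s| :: |s - p| :: rest) (ans + 1) (by simp)
        simpa [TryGo, TryLoop, List.getD, List.set, hc] using this

-- ===== VERDICT (by name: the statement is the Claim_ definition above) =====
theorem Try_spec : Claim_equal_Try := by
  intro a ans _ hpre
  unfold Spec_Try Try Try_alt
  exact tryGo_eq_tryLoop _ a ans hpre
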